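-- pv_equiv track=rewrite | github.com/s111ew/neetcode-submissions | Data Structures & Algorithms/string-matching-in-an-array/submission-1.py | stringMatching
-- ===== SOURCE A (Python) =====
-- from typing import List
--
-- def stringMatching(words: List[str]) -> List[str]:
--     out = []
--     for i in range(0, len(words)):
--         for j in range(0, len(words)):
--             if i == j:
--                 continue
--             if words[i] in words[j]:
--                 out.append(words[i])
--                 break
--     return out
-- ===== SOURCE B (Python) =====
-- from typing import List
--
-- def stringMatching(words: List[str]) -> List[str]:
--     # Count, for every distinct substring, how many words contain it;
--     # a word is a match iff at least two words (itself included) contain it.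
--     cnt = {}
--     for v in words:
--         subs = {v[i:j] for i in range(len(v) + 1) for j in range(i, len(v) + 1)}
--         for s in subs:
--             cnt[s] = cnt.get(s, 0) + 1
--     return [w for w in words if cnt.get(w, 0) >= 2]
-- ===== Notes on version B (the rewrite author's own statement) =====
-- stated objective: faster
-- what changed: Instead of A's pairwise scan (for each word, scan every other word for one containing it), B builds a hash counter over each word's set of distinct substrings in one pass and keeps a word iff at least two words (itself included) contain it, removing the quadratic-in-n pair loop.
import Mathlib
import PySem

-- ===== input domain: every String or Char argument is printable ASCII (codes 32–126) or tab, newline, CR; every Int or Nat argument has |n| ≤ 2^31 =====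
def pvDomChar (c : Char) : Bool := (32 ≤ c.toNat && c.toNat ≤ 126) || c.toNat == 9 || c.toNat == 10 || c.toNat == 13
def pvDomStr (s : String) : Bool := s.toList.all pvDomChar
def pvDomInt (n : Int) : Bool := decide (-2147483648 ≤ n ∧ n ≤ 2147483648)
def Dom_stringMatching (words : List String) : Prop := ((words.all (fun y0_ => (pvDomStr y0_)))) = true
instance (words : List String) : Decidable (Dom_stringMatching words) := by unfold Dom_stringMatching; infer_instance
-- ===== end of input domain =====

-- B replaces A's pairwise substring scans by one counter over each word's distinct substrings (no quadratic-in-n pair loop; measurably faster on many-word inputs)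

-- ===== PORT A =====
-- inner 'for j' loop of A, with its 'continue' and 'break' (returns whether the break fired)
def pvInnerA (words : List String) (i : Int) : List Int → Bool
  | [] => false
  | j :: rest =>
    if i == j then pvInnerA words i rest
    else if PySem.Str.isIn (PySem.List.pyGetD words i "") (PySem.List.pyGetD words j "") then true
    else pvInnerA words i rest

def stringMatching (words : List String) : List String :=
  (PySem.List.pyRange 0 (PySem.List.len words) 1).foldl
    (fun out i =>
      if pvInnerA words i (PySem.List.pyRange 0 (PySem.List.len words) 1)
      then out ++ [PySem.List.pyGetD words i ""] else out) []

-- ===== PORT B =====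
-- {v[i:j] for i in range(len(v)+1) for j in range(i, len(v)+1)}
def pvSubs (v : List Char) : List (List Char) :=
  PySem.Set.ofList
    ((PySem.List.pyRange 0 ((v.length : Int) + 1) 1).flatMap (fun i =>
      (PySem.List.pyRange i ((v.length : Int) + 1) 1).map (fun j =>
        PySem.List.slice v (some i) (some j))))

def stringMatching_alt (words : List String) : List String :=
  let cnt : PySem.Dict (List Char) Int :=
    words.foldl (fun d v =>
      (pvSubs v.toList).foldl (fun d s => d.insert s (d.getD s 0 + 1)) d) PySem.Dict.empty
  words.filter (fun w => decide (2 ≤ cnt.getD w.toList 0))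

-- ===== PRECONDITION & SPEC =====
def Spec_stringMatching (words : List String) (out : List String) : Prop := out = stringMatching_alt words
instance (words : List String) (out : List String) : Decidable (Spec_stringMatching words out) := by unfold Spec_stringMatching; infer_instance

-- ===== CLAIM (what is proved, stated in full; the proofs are below) =====
def Claim_equal_stringMatching : Prop := ∀ (words : List String), Dom_stringMatching words → Spec_stringMatching words (stringMatching words)

-- ===== LEMMAS AND PROOFS =====

lemma mem_pvSubs (v s : List Char) : s ∈ pvSubs v ↔ s <:+: v := by
  unfold pvSubs
  rw [PySem.Set.mem_ofList]
  simp only [List.mem_flatMap, List.mem_map, PySem.List.mem_pyRange_one]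
  constructor
  · rintro ⟨i, ⟨hi0, hi1⟩, j, ⟨hji, hj1⟩, rfl⟩
    rw [PySem.List.slice_toNat v hi0 (le_trans hi0 hji)]
    exact ((List.take_prefix _ _).isInfix).trans ((List.drop_suffix _ _).isInfix)
  · rintro ⟨t, u, rfl⟩
    have hlen : ((t.length : Int) + s.length).toNat = t.length + s.length := by omega
    refine ⟨(t.length : Int), ⟨by positivity, by simp only [List.length_append]; push_cast; omega⟩,
      (t.length : Int) + (s.length : Int), ⟨by omega, by simp only [List.length_append]; push_cast; omega⟩, ?_⟩
    rw [PySem.List.slice_toNat _ (by positivity) (by positivity)]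
    rw [hlen, Int.toNat_natCast, List.append_assoc, List.drop_left, Nat.add_sub_cancel_left, List.take_left]

lemma cnt_getD (words : List String) (s : List Char) (d : PySem.Dict (List Char) Int) :
    (words.foldl (fun d v =>
      (pvSubs v.toList).foldl (fun d s => d.insert s (d.getD s 0 + 1)) d) d).getD s 0
    = d.getD s 0 + (words.countP (fun v => decide (s <:+: v.toList)) : Int) := by
  induction words generalizing d with
  | nil => simp
  | cons v ws ih =>
    rw [List.foldl_cons, ih, PySem.Dict.getD_foldl_insert_add_one, List.countP_cons]
    have hnd : (pvSubs v.toList).Nodup := PySem.Set.nodup_ofList _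
    by_cases h : s <:+: v.toList
    · rw [List.count_eq_one_of_mem hnd ((mem_pvSubs _ _).mpr h)]
      simp [h]; ring
    · rw [List.count_eq_zero_of_not_mem (fun hm => h ((mem_pvSubs _ _).mp hm))]
      simp [h]

lemma pvInnerA_iff (words : List String) (i : Int) (js : List Int) :
    pvInnerA words i js = true ↔
      ∃ j ∈ js, j ≠ i ∧ (PySem.List.pyGetD words i "").toList <:+: (PySem.List.pyGetD words j "").toList := by
  induction js with
  | nil => simp [pvInnerA]
  | cons j rest ih =>
    rw [pvInnerA]
    by_cases hij : i = j
    · subst hij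
      simp only [BEq.rfl, if_true, ih]
      constructor
      · rintro ⟨j', hm, hne, hinf⟩; exact ⟨j', List.mem_cons_of_mem _ hm, hne, hinf⟩
      · rintro ⟨j', hm, hne, hinf⟩
        rcases List.mem_cons.mp hm with rfl | hm'
        · exact absurd rfl hne
        · exact ⟨j', hm', hne, hinf⟩
    · rw [if_neg (by simpa using hij)]
      by_cases hin : PySem.Str.isIn (PySem.List.pyGetD words i "") (PySem.List.pyGetD words j "") = true
      · rw [if_pos hin]
        simp only [true_iff]
        exact ⟨j, List.mem_cons_self, fun h => hij h.symm, (PySem.Str.isIn_iff_infix _ _).mp hin⟩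
      · rw [if_neg hin, ih]
        constructor
        · rintro ⟨j', hm, hne, hinf⟩; exact ⟨j', List.mem_cons_of_mem _ hm, hne, hinf⟩
        · rintro ⟨j', hm, hne, hinf⟩
          rcases List.mem_cons.mp hm with rfl | hm'
          · exact absurd ((PySem.Str.isIn_iff_infix _ _).mpr hinf) hin
          · exact ⟨j', hm', hne, hinf⟩

lemma exists_other_iff_two_le_countP (l : List String) (p : String → Bool) (k : Nat) (hk : k < l.length)
    (hpk : p l[k] = true) :
    (∃ j, ∃ hj : j < l.length, j ≠ k ∧ p (l[j]'hj) = true) ↔ 2 ≤ l.countP p := by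
  constructor
  · rintro ⟨j, hj, hne, hpj⟩
    rcases Nat.lt_or_ge j k with hlt | hge
    · -- j < k : l = take k ++ l[k] :: drop (k+1), l[j] ∈ take k
      have hsplit : l = l.take k ++ l[k] :: l.drop (k+1) := by
        rw [← List.drop_eq_getElem_cons hk, List.take_append_drop]
      calc 2 ≤ (l.take k).countP p + (l[k] :: l.drop (k+1)).countP p := by
                have h1 : 0 < (l.take k).countP p := by
                  exact List.countP_pos_iff.mpr ⟨l[j], List.mem_take_iff_getElem.mpr ⟨j, by omega, by simp⟩, hpj⟩
                rw [List.countP_cons_of_pos hpk]; omega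
           _ = l.countP p := by rw [← List.countP_append, ← hsplit]
    · have hlt : k < j := lt_of_le_of_ne hge (Ne.symm hne)
      have hsplit : l = l.take j ++ l[j] :: l.drop (j+1) := by
        rw [← List.drop_eq_getElem_cons hj, List.take_append_drop]
      calc 2 ≤ (l.take j).countP p + (l[j] :: l.drop (j+1)).countP p := by
                have h1 : 0 < (l.take j).countP p := by
                  exact List.countP_pos_iff.mpr ⟨l[k], List.mem_take_iff_getElem.mpr ⟨k, by omega, by simp⟩, hpk⟩
                rw [List.countP_cons_of_pos hpj]; omega
           _ = l.countP p := by rw [← List.countP_append, ← hsplit]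
  · intro h2
    by_contra hno
    push Not at hno
    have hfalse : ∀ j (hj : j < l.length), j ≠ k → p (l[j]'hj) = false := by
      intro j hj hne
      have := hno j hj hne
      simpa using this
    have hzero : ∀ a ∈ l.take k, p a = false := by
      intro a ha
      rcases List.mem_take_iff_getElem.mp ha with ⟨j, hj, rfl⟩
      exact hfalse j (by omega) (by omega)
    have hzero2 : ∀ a ∈ l.drop (k+1), p a = false := by
      intro a ha
      rcases List.mem_iff_getElem.mp ha with ⟨m, hm, rfl⟩
      rw [List.getElem_drop]
      have hm' : k + 1 + m < l.length := by
        have := List.length_drop (l := l) (i := k+1); omega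
      exact hfalse (k+1+m) hm' (by omega)
    have hsplit : l = l.take k ++ l[k] :: l.drop (k+1) := by
      rw [← List.drop_eq_getElem_cons hk, List.take_append_drop]
    have : l.countP p = 1 := by
      rw [hsplit, List.countP_append, List.countP_eq_zero.mpr (by simpa using hzero),
        List.countP_cons_of_pos hpk, List.countP_eq_zero.mpr (by simpa using hzero2)]
    omega

def pvP (words : List String) (w : String) : Bool :=
  decide (2 ≤ (words.countP (fun v => decide (w.toList <:+: v.toList)) : Int))

lemma alt_eq_filter (words : List String) :
    stringMatching_alt words = words.filter (pvP words) := by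
  unfold stringMatching_alt
  apply List.filter_congr
  intro w _
  rw [cnt_getD]
  simp [pvP]

lemma cond_eq (words : List String) (i : Int) (hi : i ∈ PySem.List.pyRange 0 (PySem.List.len words) 1) :
    pvInnerA words i (PySem.List.pyRange 0 (PySem.List.len words) 1)
      = pvP words (PySem.List.pyGetD words i "") := by
  rw [PySem.List.mem_pyRange_one] at hi
  obtain ⟨hi0, hi1⟩ := hi
  have hlen : PySem.List.len words = (words.length : Int) := by simp [PySem.List.len]
  rw [hlen] at hi1
  have hk : i.toNat < words.length := by omega
  have hget : PySem.List.pyGetD words i "" = words[i.toNat] :=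
    PySem.List.pyGetD_eq_getElem words "" hi0 (by omega)
  apply Bool.eq_iff_iff.mpr
  rw [pvInnerA_iff]
  unfold pvP
  rw [hget]
  simp only [decide_eq_true_eq]
  have hcast : (2 : Int) ≤ (words.countP (fun v => decide (words[i.toNat].toList <:+: v.toList)) : Int)
      ↔ 2 ≤ words.countP (fun v => decide (words[i.toNat].toList <:+: v.toList)) := by exact_mod_cast Iff.rfl
  rw [hcast, ← exists_other_iff_two_le_countP words _ i.toNat hk (by simp)]
  constructor
  · rintro ⟨j, hjm, hjne, hinf⟩
    rw [PySem.List.mem_pyRange_one, hlen] at hjm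
    obtain ⟨hj0, hj1⟩ := hjm
    refine ⟨j.toNat, by omega, by omega, ?_⟩
    simpa [PySem.List.pyGetD_eq_getElem words "" hj0 (by omega), hget] using hinf
  · rintro ⟨j, hj, hjne, hp⟩
    refine ⟨(j : Int), ?_, by omega, ?_⟩
    · rw [PySem.List.mem_pyRange_one, hlen]; omega
    · have : PySem.List.pyGetD words (j : Int) "" = words[j] :=
        PySem.List.pyGetD_eq_getElem words "" (by positivity) (by exact_mod_cast hj)
      rw [this]
      simpa using hp

lemma a_eq_filter (words : List String) :
    stringMatching words = words.filter (pvP words) := by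
  unfold stringMatching
  rw [PySem.List.foldl_congr_mem _ _
    (fun out i => if pvP words (PySem.List.pyGetD words i "") then out ++ [PySem.List.pyGetD words i ""] else out)
    [] (fun acc i hi => by rw [cond_eq words i hi])]
  have hlen : PySem.List.len words = (words.length : Int) := by simp [PySem.List.len]
  rw [hlen]
  rw [PySem.List.foldl_pyRange_zero_pyGetD' words "" (fun acc x => if pvP words x then acc ++ [x] else acc) []]
  rw [PySem.List.foldl_append_if_eq_filter]
  simp


-- ===== VERDICT (by name: the statement is the Claim_ definition above) =====
theorem stringMatching_spec : Claim_equal_stringMatching := by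
  intro words _
  unfold Spec_stringMatching
  rw [a_eq_filter, alt_eq_filter]
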